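-- pv_equiv track=rewrite | github.com/boyuanzheng010/Multi_Coref_Data | data_construction/generate_zh_fa_coref_pilot/utils.py | merge_head_sharing_np
-- ===== SOURCE A (Python) =====
-- from copy import deepcopy
--
-- def merge_head_sharing_np(spans):
--     temp = deepcopy(spans)
--     temp.sort(key=lambda y: y[1])
--     span_dict = {}
--     for text, start, end in temp:
--         if start in span_dict:
--             span_dict[start].append([text, start, end, end - start])
--         else:
--             span_dict[start] = [[text, start, end, end - start]]
--     spans = []
--     for x in span_dict:
--         spans.append(tuple([span_dict[x][0][0], span_dict[x][0][1], span_dict[x][0][2]]))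
--     return spans
-- ===== SOURCE B (Python) =====
-- def merge_head_sharing_np(spans):
--     first_by_start = {}
--     for text, start, end in spans:
--         if start not in first_by_start:
--             first_by_start[start] = (text, start, end)
--     return [first_by_start[k] for k in sorted(first_by_start)]
-- ===== Notes on version B (the rewrite author's own statement) =====
-- stated objective: alternative
-- what changed: Instead of copying and stably sorting the whole span list and then grouping every span into per-start lists, B makes one pass over the original list recording only the first span per start, then sorts just the distinct start keys and emits their recorded spans.
import Mathlib
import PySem

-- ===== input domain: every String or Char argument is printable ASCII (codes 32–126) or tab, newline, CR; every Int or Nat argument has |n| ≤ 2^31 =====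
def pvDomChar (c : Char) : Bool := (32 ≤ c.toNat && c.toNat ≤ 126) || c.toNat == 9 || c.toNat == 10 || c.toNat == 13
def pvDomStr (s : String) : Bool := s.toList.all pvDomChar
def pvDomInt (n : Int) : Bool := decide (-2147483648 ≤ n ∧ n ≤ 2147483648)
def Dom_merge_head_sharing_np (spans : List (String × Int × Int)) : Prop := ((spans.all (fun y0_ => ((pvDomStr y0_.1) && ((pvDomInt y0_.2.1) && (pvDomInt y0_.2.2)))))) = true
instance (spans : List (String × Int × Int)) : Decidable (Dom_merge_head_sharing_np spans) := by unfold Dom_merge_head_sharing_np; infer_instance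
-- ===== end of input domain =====

-- B builds the first-span-per-start dict in ONE pass over the original list (no copy, no full sort)
-- and then sorts only the distinct start keys: same return value, different decomposition.


-- ===== PORT A =====
-- deepcopy, then stable sort by start, group spans by start into a dict of
-- [text, start, end, end-start] lists, then emit the first triple of each group in dict order.
def merge_head_sharing_np (spans : List (String × Int × Int)) : List (String × Int × Int) :=
  let temp := PySem.List.sorted spans (fun y => y.2.1)
  let span_dict : PySem.Dict Int (List (String × Int × Int × Int)) :=
    temp.foldl (fun d t =>
      if d.contains t.2.1 then
        d.insert t.2.1 (d.getD t.2.1 [] ++ [(t.1, t.2.1, t.2.2, t.2.2 - t.2.1)])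
      else
        d.insert t.2.1 [(t.1, t.2.1, t.2.2, t.2.2 - t.2.1)]) PySem.Dict.empty
  -- 'for x in span_dict: spans.append(tuple(span_dict[x][0][:3]))': iterate the dict in
  -- insertion order; span_dict[x] is the value at key x (keys are unique), so this is items;
  -- [0] on the (always nonempty) group list is headI.
  span_dict.items.foldl (fun acc kv =>
    acc ++ [(kv.2.headI.1, kv.2.headI.2.1, kv.2.headI.2.2.1)]) []

-- ===== PORT B =====
-- one pass recording the first span per start, then sort the distinct starts.
def merge_head_sharing_np_alt (spans : List (String × Int × Int)) : List (String × Int × Int) :=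
  let d : PySem.Dict Int (String × Int × Int) :=
    spans.foldl (fun d t => if d.contains t.2.1 then d else d.insert t.2.1 t) PySem.Dict.empty
  -- 'first_by_start[k]' for k drawn from the dict itself always hits, so getD's default is never used
  (PySem.List.sorted d.keys (fun k => k)).map (fun k => d.getD k ("", 0, 0))

-- ===== PRECONDITION & SPEC =====
def Spec_merge_head_sharing_np (spans : List (String × Int × Int)) (out : List (String × Int × Int)) : Prop := out = merge_head_sharing_np_alt spans
instance (spans : List (String × Int × Int)) (out : List (String × Int × Int)) : Decidable (Spec_merge_head_sharing_np spans out) := by unfold Spec_merge_head_sharing_np; infer_instance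

-- ===== CLAIM (what is proved, stated in full; the proofs are below) =====
def Claim_equal_merge_head_sharing_np : Prop := ∀ (spans : List (String × Int × Int)), Dom_merge_head_sharing_np spans → Spec_merge_head_sharing_np spans (merge_head_sharing_np spans)

-- ===== LEMMAS AND PROOFS =====

-- the predicate 'this span starts at s'
def pvP (s : Int) (t : String × Int × Int) : Bool := t.2.1 == s

-- the 4-tuple A stores per span
def pvQ (t : String × Int × Int) : String × Int × Int × Int := (t.1, t.2.1, t.2.2, t.2.2 - t.2.1)

-- first span of `l` starting at s (default never matters for keys that occur)
def pvF (l : List (String × Int × Int)) (s : Int) : String × Int × Int :=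
  (l.find? (pvP s)).getD ("", 0, 0)

-- A's loop body and B's loop body
def pvAstep (d : PySem.Dict Int (List (String × Int × Int × Int))) (t : String × Int × Int) :
    PySem.Dict Int (List (String × Int × Int × Int)) :=
  if d.contains t.2.1 then d.insert t.2.1 (d.getD t.2.1 [] ++ [pvQ t]) else d.insert t.2.1 [pvQ t]

def pvBstep (d : PySem.Dict Int (String × Int × Int)) (t : String × Int × Int) :
    PySem.Dict Int (String × Int × Int) :=
  if d.contains t.2.1 then d else d.insert t.2.1 t

-- insertion step of PySem's stable sort, specialised to our key
def pvIns (acc : List (String × Int × Int)) (x : String × Int × Int) : List (String × Int × Int) :=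
  PySem.List.insertBy (fun a b => decide (a.2.1 < b.2.1)) x acc

theorem pairwise_pvIns (x : String × Int × Int) (ys : List (String × Int × Int))
    (h : ys.Pairwise (fun a b => a.2.1 ≤ b.2.1)) :
    (pvIns ys x).Pairwise (fun a b => a.2.1 ≤ b.2.1) := by
  induction ys with
  | nil => simp [pvIns, PySem.List.insertBy]
  | cons y t ih =>
    rw [List.pairwise_cons] at h
    unfold pvIns PySem.List.insertBy
    by_cases hlt : x.2.1 < y.2.1
    · simp only [hlt, decide_true, if_true]
      refine List.Pairwise.cons ?_ (List.Pairwise.cons h.1 h.2)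
      intro z hz
      rcases List.mem_cons.mp hz with rfl | hz
      · exact le_of_lt hlt
      · exact le_trans (le_of_lt hlt) (h.1 z hz)
    · simp only [hlt, decide_false]
      refine List.Pairwise.cons ?_ (ih h.2)
      intro z hz
      have hz' := (PySem.List.mem_insertBy _ _ _ _).mp hz
      rcases hz' with rfl | hz'
      · exact le_of_not_gt hlt
      · exact h.1 z hz'

theorem find?_pvIns_ne (x : String × Int × Int) (ys : List (String × Int × Int)) (s : Int)
    (hx : x.2.1 ≠ s) : (pvIns ys x).find? (pvP s) = ys.find? (pvP s) := by
  induction ys with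
  | nil => simp [pvIns, PySem.List.insertBy, pvP, hx]
  | cons y t ih =>
    unfold pvIns PySem.List.insertBy
    by_cases hlt : x.2.1 < y.2.1
    · simp only [hlt, decide_true]
      rw [if_pos trivial, List.find?_cons_of_neg (by simp [pvP, hx])]
    · simp only [hlt, decide_false, Bool.false_eq_true, if_false]
      cases hpy : pvP s y
      · rw [List.find?_cons_of_neg (by simp [hpy]), List.find?_cons_of_neg (by simp [hpy])]
        exact ih
      · rw [List.find?_cons_of_pos hpy, List.find?_cons_of_pos hpy]

theorem find?_pvIns_eq (x : String × Int × Int) (ys : List (String × Int × Int)) (s : Int)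
    (hx : x.2.1 = s) (h : ys.Pairwise (fun a b => a.2.1 ≤ b.2.1)) :
    (pvIns ys x).find? (pvP s) = (ys.find? (pvP s)).or (some x) := by
  subst hx
  induction ys with
  | nil => simp [pvIns, PySem.List.insertBy, pvP]
  | cons y t ih =>
    rw [List.pairwise_cons] at h
    unfold pvIns PySem.List.insertBy
    by_cases hlt : x.2.1 < y.2.1
    · -- y and everything after it has key > s, so the old list has no match
      have hys : (y :: t).find? (pvP x.2.1) = none := by
        rw [List.find?_eq_none]
        intro z hz
        rcases List.mem_cons.mp hz with rfl | hz
        · simp [pvP]; omega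
        · have := h.1 z hz; simp [pvP]; omega
      simp only [hlt, decide_true]
      rw [if_pos trivial, List.find?_cons_of_pos (by simp [pvP]), hys]
      rfl
    · simp only [hlt, decide_false, Bool.false_eq_true, if_false]
      cases hpy : pvP x.2.1 y
      · rw [List.find?_cons_of_neg (by simp [hpy]), List.find?_cons_of_neg (by simp [hpy])]
        exact ih h.2
      · rw [List.find?_cons_of_pos hpy, List.find?_cons_of_pos hpy]
        rfl

theorem find?_foldl_pvIns (l : List (String × Int × Int)) (acc : List (String × Int × Int)) (s : Int)
    (h : acc.Pairwise (fun a b => a.2.1 ≤ b.2.1)) :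
    (l.foldl pvIns acc).find? (pvP s) = (acc.find? (pvP s)).or (l.find? (pvP s)) := by
  induction l generalizing acc with
  | nil => simp
  | cons x l ih =>
    rw [List.foldl_cons, ih (pvIns acc x) (pairwise_pvIns x acc h), List.find?_cons]
    by_cases hx : x.2.1 = s
    · rw [find?_pvIns_eq x acc s hx h]
      have : pvP s x = true := by simp [pvP, hx]
      rw [this, Option.or_assoc]
      cases l.find? (pvP s) <;> rfl
    · rw [find?_pvIns_ne x acc s hx]
      have : pvP s x = false := by simp [pvP, hx]
      rw [this]

-- STABILITY of Python's sort: the first element with start s is the same before and after sorting.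
theorem sorted_find? (spans : List (String × Int × Int)) (s : Int) :
    (PySem.List.sorted spans (fun y => y.2.1)).find? (pvP s) = spans.find? (pvP s) := by
  rw [PySem.List.sorted_eq_foldl_insertBy spans (fun y => y.2.1)]
  have := find?_foldl_pvIns spans [] s (by simp)
  simpa using this

-- B's dict: lookup = first occurrence
theorem B_get? (l : List (String × Int × Int)) (d : PySem.Dict Int (String × Int × Int)) (s : Int) :
    (l.foldl pvBstep d).get? s = (d.get? s).or (l.find? (pvP s)) := by
  induction l generalizing d with
  | nil => simp
  | cons t l ih =>
    rw [List.foldl_cons, ih, List.find?_cons]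
    unfold pvBstep
    by_cases hc : d.contains t.2.1 = true
    · rw [if_pos hc]
      by_cases hs : t.2.1 = s
      · subst hs
        have : (d.get? t.2.1).isSome := by rw [← PySem.Dict.contains_eq_isSome_get?]; exact hc
        obtain ⟨v, hv⟩ := Option.isSome_iff_exists.mp this
        simp [hv]
      · have hp : pvP s t = false := by simp [pvP]; intro h; exact hs h
        rw [hp]
    · rw [if_neg hc]
      by_cases hs : t.2.1 = s
      · subst hs
        have hnone : d.get? t.2.1 = none := by
          have := PySem.Dict.contains_eq_isSome_get? d t.2.1
          rw [eq_false_of_ne_true hc] at this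
          exact Option.not_isSome_iff_eq_none.mp (by rw [← this]; simp)
        have hp : pvP t.2.1 t = true := by simp [pvP]
        rw [PySem.Dict.get?_insert_self, hnone, hp]
        simp
      · have hp : pvP s t = false := by simp [pvP]; intro h; exact hs h
        rw [hp, PySem.Dict.get?_insert_of_ne _ _ (fun h => hs h.symm)]

-- both loops insert exactly the starts, first occurrences first
theorem B_keys (l : List (String × Int × Int)) (d : PySem.Dict Int (String × Int × Int)) :
    (l.foldl pvBstep d).keys = (l.map (fun t => t.2.1)).foldl PySem.Set.add d.keys := by
  induction l generalizing d with
  | nil => rfl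
  | cons t l ih =>
    rw [List.foldl_cons, ih, List.map_cons, List.foldl_cons]
    congr 1
    unfold pvBstep PySem.Set.add
    by_cases hc : d.contains t.2.1 = true
    · have hmem : t.2.1 ∈ d.keys := (PySem.Dict.contains_iff_mem_keys d t.2.1).mp hc
      rw [if_pos hc, if_pos (by simp [PySem.Set.contains, hmem])]
    · have hm : t.2.1 ∉ d.keys := fun hm => hc ((PySem.Dict.contains_iff_mem_keys d t.2.1).mpr hm)
      rw [if_neg hc, if_neg (by simp [PySem.Set.contains, hm]),
        PySem.Dict.keys_insert_of_not_contains _ _ (eq_false_of_ne_true hc)]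

theorem A_keys (l : List (String × Int × Int)) (d : PySem.Dict Int (List (String × Int × Int × Int))) :
    (l.foldl pvAstep d).keys = (l.map (fun t => t.2.1)).foldl PySem.Set.add d.keys := by
  induction l generalizing d with
  | nil => rfl
  | cons t l ih =>
    rw [List.foldl_cons, ih, List.map_cons, List.foldl_cons]
    congr 1
    unfold pvAstep PySem.Set.add
    by_cases hc : d.contains t.2.1 = true
    · have hmem : t.2.1 ∈ d.keys := (PySem.Dict.contains_iff_mem_keys d t.2.1).mp hc
      rw [if_pos hc, if_pos (by simp [PySem.Set.contains, hmem]), PySem.Dict.keys_insert_of_contains _ _ hc]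
    · have hm : t.2.1 ∉ d.keys := fun hm => hc ((PySem.Dict.contains_iff_mem_keys d t.2.1).mpr hm)
      rw [if_neg hc, if_neg (by simp [PySem.Set.contains, hm]),
        PySem.Dict.keys_insert_of_not_contains _ _ (eq_false_of_ne_true hc)]

-- nonempty-group invariant of A's dict
def pvInv (d : PySem.Dict Int (List (String × Int × Int × Int))) : Prop :=
  ∀ k v, d.get? k = some v → v ≠ []

theorem pvInv_step (d : PySem.Dict Int (List (String × Int × Int × Int))) (t : String × Int × Int)
    (h : pvInv d) : pvInv (pvAstep d t) := by
  intro k v hv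
  unfold pvAstep at hv
  split at hv <;> rw [PySem.Dict.get?_insert] at hv <;> split at hv
  · cases hv; simp
  · exact h k v hv
  · cases hv; simp
  · exact h k v hv

-- A's dict: the head of the group at s is the 4-tuple of the first occurrence at s
theorem A_get?_head (l : List (String × Int × Int)) (d : PySem.Dict Int (List (String × Int × Int × Int)))
    (hinv : pvInv d) (s : Int) :
    ((l.foldl pvAstep d).get? s).map List.headI
      = ((d.get? s).map List.headI).or ((l.find? (pvP s)).map pvQ) := by
  induction l generalizing d with
  | nil => simp
  | cons t l ih =>
    rw [List.foldl_cons, ih (pvAstep d t) (pvInv_step d t hinv), List.find?_cons]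
    have hstep : ∀ s', ((pvAstep d t).get? s').map List.headI
        = ((d.get? s').map List.headI).or (if t.2.1 = s' then some (pvQ t) else none) := by
      intro s'
      unfold pvAstep
      by_cases hc : d.contains t.2.1 = true
      · rw [if_pos hc, PySem.Dict.get?_insert]
        have hsome : (d.get? t.2.1).isSome := by
          rw [← PySem.Dict.contains_eq_isSome_get?]; exact hc
        obtain ⟨v, hv⟩ := Option.isSome_iff_exists.mp hsome
        split
        · next hs =>
          subst hs
          have hvne : v ≠ [] := hinv _ _ hv
          cases v with
          | nil => exact absurd rfl hvne
          | cons a tl => simp [PySem.Dict.getD_eq_get?_getD, hv]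
        · next hs =>
          rw [if_neg (fun h => hs h.symm)]
          cases d.get? s' <;> simp
      · rw [if_neg hc, PySem.Dict.get?_insert]
        have hnone : d.get? t.2.1 = none := by
          have := PySem.Dict.contains_eq_isSome_get? d t.2.1
          rw [eq_false_of_ne_true hc] at this
          exact Option.not_isSome_iff_eq_none.mp (by rw [← this]; simp)
        split
        · next hs => subst hs; simp [hnone]
        · next hs =>
          rw [if_neg (fun h => hs h.symm)]
          cases d.get? s' <;> simp
    rw [hstep s]
    by_cases hs : t.2.1 = s
    · have hp : pvP s t = true := by simp [pvP, hs]
      rw [hp, if_pos hs, Option.or_assoc]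
      cases l.find? (pvP s) <;> rfl
    · have hp : pvP s t = false := by simp [pvP, hs]
      rw [hp, if_neg hs]
      cases hq : (d.get? s).map List.headI <;> rfl

-- Set.ofList of a list is one of its sublists
theorem foldl_add_sublist (xs : List Int) : ∀ acc : List Int,
    ∃ ys, xs.foldl PySem.Set.add acc = acc ++ ys ∧ ys.Sublist xs := by
  induction xs with
  | nil => intro acc; exact ⟨[], by simp⟩
  | cons x xs ih =>
    intro acc
    rw [List.foldl_cons]
    obtain ⟨ys, hys, hsub⟩ := ih (PySem.Set.add acc x)
    by_cases hc : PySem.Set.contains acc x = true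
    · have hadd : PySem.Set.add acc x = acc := by unfold PySem.Set.add; rw [if_pos hc]
      exact ⟨ys, by rw [hys, hadd], hsub.trans (List.sublist_cons_self x xs)⟩
    · have hadd : PySem.Set.add acc x = acc ++ [x] := by unfold PySem.Set.add; rw [if_neg hc]
      exact ⟨x :: ys, by rw [hys, hadd]; simp, List.Sublist.cons₂ x hsub⟩

-- the list of distinct starts drawn from the sorted list IS the ascending sort of the distinct starts
theorem keys_sorted_eq (spans : List (String × Int × Int)) :
    PySem.Set.ofList ((PySem.List.sorted spans (fun y => y.2.1)).map (fun t => t.2.1))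
      = PySem.List.sorted (PySem.Set.ofList (spans.map (fun t => t.2.1))) (fun k => k) := by
  set temp := PySem.List.sorted spans (fun y => y.2.1) with htemp
  refine (PySem.List.sorted_eq_of_perm_of_pairwise_lt _ _ _ ?_ ?_).symm
  · rw [List.perm_ext_iff_of_nodup (PySem.Set.nodup_ofList _) (PySem.Set.nodup_ofList _)]
    intro a
    rw [PySem.Set.mem_ofList, PySem.Set.mem_ofList, List.mem_map, List.mem_map]
    constructor
    · rintro ⟨t, ht, rfl⟩; exact ⟨t, (PySem.List.mem_sorted _ _ _ _).mp ht, rfl⟩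
    · rintro ⟨t, ht, rfl⟩; exact ⟨t, (PySem.List.mem_sorted _ _ _ _).mpr ht, rfl⟩
  · have hle : (temp.map (fun t => t.2.1)).Pairwise (fun a b => a ≤ b) :=
      PySem.List.sorted_map_key_pairwise spans (fun y => y.2.1)
    obtain ⟨ys, hys, hsub⟩ := foldl_add_sublist (temp.map (fun t => t.2.1)) []
    have hofl : PySem.Set.ofList (temp.map (fun t => t.2.1)) = ys := by
      rw [PySem.Set.ofList_eq_foldl, hys]; simp
    rw [hofl]
    have hpair : ys.Pairwise (fun a b => a ≤ b) := hle.sublist hsub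
    have hnd : ys.Nodup := by rw [← hofl]; exact PySem.Set.nodup_ofList _
    have := List.Pairwise.and hpair hnd
    exact this.imp (fun {a b} h => lt_of_le_of_ne h.1 h.2)

-- foldl-append is map
theorem foldl_append_map {α β : Type} (l : List α) (f : α → β) (a : List β) :
    l.foldl (fun acc x => acc ++ [f x]) a = a ++ l.map f := by
  induction l generalizing a with
  | nil => simp
  | cons x l ih => rw [List.foldl_cons, ih, List.map_cons]; simp

-- ===== VERDICT (by name: the statement is the Claim_ definition above) =====
theorem merge_head_sharing_np_spec : Claim_equal_merge_head_sharing_np := by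
  intro spans _
  unfold Spec_merge_head_sharing_np merge_head_sharing_np merge_head_sharing_np_alt
  simp only []
  set temp := PySem.List.sorted spans (fun y => y.2.1) with htemp
  set AD := temp.foldl (fun d t =>
      if d.contains t.2.1 then
        d.insert t.2.1 (d.getD t.2.1 [] ++ [(t.1, t.2.1, t.2.2, t.2.2 - t.2.1)])
      else
        d.insert t.2.1 [(t.1, t.2.1, t.2.2, t.2.2 - t.2.1)]) PySem.Dict.empty with hAD
  set BD := spans.foldl (fun d t => if d.contains t.2.1 then d else d.insert t.2.1 t)
      PySem.Dict.empty with hBD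
  have hADfold : AD = temp.foldl pvAstep PySem.Dict.empty := by rw [hAD]; rfl
  have hBDfold : BD = spans.foldl pvBstep PySem.Dict.empty := by rw [hBD]; rfl
  -- keys of both dicts
  have hAkeys : AD.keys = PySem.Set.ofList (temp.map (fun t => t.2.1)) := by
    rw [hADfold, A_keys, PySem.Dict.keys_empty, PySem.Set.ofList_eq_foldl]
  have hBkeys : BD.keys = PySem.Set.ofList (spans.map (fun t => t.2.1)) := by
    rw [hBDfold, B_keys, PySem.Dict.keys_empty, PySem.Set.ofList_eq_foldl]
  have hAnodup : AD.keys.Nodup := by rw [hAkeys]; exact PySem.Set.nodup_ofList _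
  -- lookups
  have hBget : ∀ s, BD.get? s = spans.find? (pvP s) := by
    intro s; rw [hBDfold, B_get?, PySem.Dict.get?_empty]; rfl
  have hAget : ∀ s, (AD.get? s).map List.headI = (spans.find? (pvP s)).map pvQ := by
    intro s
    rw [hADfold, A_get?_head _ _ (by intro k v hv; rw [PySem.Dict.get?_empty] at hv; cases hv),
        PySem.Dict.get?_empty, htemp, sorted_find?]
    rfl
  -- A's output as a map over its keys
  rw [foldl_append_map, List.nil_append,
      PySem.Dict.items_eq_map_keys AD hAnodup [], List.map_map]
  -- pointwise: both sides produce pvF spans k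
  have hApt : ∀ k, ((fun kv => (kv.2.headI.1, kv.2.headI.2.1, kv.2.headI.2.2.1)) ∘
      (fun k => (k, AD.getD k []))) k = pvF spans k := by
    intro k
    have := hAget k
    simp only [Function.comp, PySem.Dict.getD_eq_get?_getD, pvF]
    cases hq : AD.get? k with
    | none =>
      rw [hq] at this
      cases hf : (spans.find? (pvP k)) with
      | none => rfl
      | some t => rw [hf] at this; simp at this
    | some v =>
      rw [hq] at this
      cases hf : (spans.find? (pvP k)) with
      | none => rw [hf] at this; simp at this
      | some t =>
        rw [hf] at this
        simp only [Option.map_some, Option.some.injEq] at this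
        simp [this, pvQ]
  have hBpt : ∀ k, BD.getD k ("", 0, 0) = pvF spans k := by
    intro k; rw [PySem.Dict.getD_eq_get?_getD, hBget k]; rfl
  rw [List.map_congr_left (fun k _ => hApt k), hAkeys, keys_sorted_eq, ← hBkeys,
      List.map_congr_left (fun k _ => hBpt k)]
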